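-- pv_equiv track=rewrite | github.com/Alaa-Eldeen-Essam/Tessract_OCR_PDF | layout_OCR/controllers/pipeline_controller.py | _extract_digit_groups
-- ===== SOURCE A (Python) =====
-- def _extract_digit_groups(text: str) -> list[str]:
--     groups: list[str] = []
--     current: list[str] = []
--     has_digit = False
--     for ch in text:
--         if _is_digit_or_sep(ch):
--             current.append(ch)
--             if ch.isdigit():
--                 has_digit = True
--         else:
--             if current and has_digit:
--                 groups.append("".join(current).strip())
--             current = []
--             has_digit = False
--     if current and has_digit:
--         groups.append("".join(current).strip())
--     return groups
--
-- def _is_digit_or_sep(ch: str) -> bool: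
--     return ch.isdigit() or ch in {".", ",", "-", "/", ":"}
-- ===== SOURCE B (Python) =====
-- def _is_digit_or_sep(ch: str) -> bool:
--     return ch.isdigit() or ch in {".", ",", "-", "/", ":"}
--
--
-- def _extract_digit_groups(text: str) -> list[str]:
--     # Run-scanner: jump over maximal runs of digit/sep chars by index, slice
--     # each run out, keep it (stripped) if it contains a digit.
--     out: list[str] = []
--     i, n = 0, len(text)
--     while i < n:
--         if _is_digit_or_sep(text[i]):
--             j = i
--             while j < n and _is_digit_or_sep(text[j]):
--                 j += 1
--             run = text[i:j]
--             if any(c.isdigit() for c in run):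
--                 out.append(run.strip())
--             i = j
--         else:
--             i += 1
--     return out
-- ===== Notes on version B (the rewrite author's own statement) =====
-- stated objective: alternative
-- what changed: Replaced A's char-by-char fold with a mutable current buffer and has_digit flag by an index-based run scanner that jumps over each maximal digit/separator run, slices it out, and keeps it iff any(c.isdigit()) holds.
import Mathlib
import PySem

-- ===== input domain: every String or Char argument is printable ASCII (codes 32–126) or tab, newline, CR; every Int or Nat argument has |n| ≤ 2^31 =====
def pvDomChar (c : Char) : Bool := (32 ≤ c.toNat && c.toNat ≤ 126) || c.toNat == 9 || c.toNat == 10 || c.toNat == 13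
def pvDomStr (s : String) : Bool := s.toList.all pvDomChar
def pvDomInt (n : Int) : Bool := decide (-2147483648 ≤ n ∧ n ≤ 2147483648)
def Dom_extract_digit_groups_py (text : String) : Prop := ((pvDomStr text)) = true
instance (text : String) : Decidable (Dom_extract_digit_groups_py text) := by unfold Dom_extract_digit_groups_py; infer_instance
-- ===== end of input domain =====

-- B replaces A's char-by-char fold (current buffer + has_digit flag) by a run scanner
-- over maximal digit/separator runs; same return value (alternative decomposition, not faster).

-- ===== PORT A =====
def pvIsDigitOrSep (c : Char) : Bool :=
  PySem.Chars.isdigit c || (c == '.' || c == ',' || c == '-' || c == '/' || c == ':')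

def pvGoA : List Char → List String → List Char → Bool → List String
  | [], groups, current, hd =>
      groups ++ (if !current.isEmpty && hd then [String.mk (PySem.Chars.strip current)] else [])
  | c :: rest, groups, current, hd =>
      if pvIsDigitOrSep c then
        pvGoA rest groups (current ++ [c]) (hd || PySem.Chars.isdigit c)
      else
        pvGoA rest
          (if !current.isEmpty && hd then groups ++ [String.mk (PySem.Chars.strip current)]
           else groups) [] false

def extract_digit_groups_py (text : String) : List String :=
  pvGoA text.toList [] [] false

-- ===== PORT B =====
def pvGoB : List Char → List String
  | [] => []
  | c :: rest =>
      if h : pvIsDigitOrSep c then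
        (if ((c :: rest).takeWhile pvIsDigitOrSep).any PySem.Chars.isdigit then
           [String.mk (PySem.Chars.strip ((c :: rest).takeWhile pvIsDigitOrSep))]
         else [])
        ++ pvGoB ((c :: rest).dropWhile pvIsDigitOrSep)
      else pvGoB rest
termination_by l => l.length
decreasing_by
  · simp only [List.dropWhile_cons, h, if_pos, List.length_cons]
    exact Nat.lt_succ_of_le (List.length_dropWhile_le _ _)
  · simp

def extract_digit_groups_py_alt (text : String) : List String :=
  pvGoB text.toList

-- ===== PRECONDITION & SPEC =====
def Spec_extract_digit_groups_py (text : String) (out : List String) : Prop := out = extract_digit_groups_py_alt text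
instance (text : String) (out : List String) : Decidable (Spec_extract_digit_groups_py text out) := by unfold Spec_extract_digit_groups_py; infer_instance

-- ===== CLAIM (what is proved, stated in full; the proofs are below) =====
def Claim_equal_extract_digit_groups_py : Prop := ∀ (text : String), Dom_extract_digit_groups_py text → Spec_extract_digit_groups_py text (extract_digit_groups_py text)

-- ===== LEMMAS AND PROOFS =====

lemma pvGoA_groups (l : List Char) (groups : List String) (current : List Char) (hd : Bool) :
    pvGoA l groups current hd = groups ++ pvGoA l [] current hd := by
  induction l generalizing groups current hd with
  | nil => simp [pvGoA]
  | cons c rest ih =>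
      simp only [pvGoA]
      split
      · rw [ih]
      · rw [ih, ih]
        split_ifs
        · conv_rhs => rw [ih]
          simp
        · simp

lemma pvGoB_char (l : List Char) :
    pvGoB l =
      (if !(l.takeWhile pvIsDigitOrSep).isEmpty && (l.takeWhile pvIsDigitOrSep).any PySem.Chars.isdigit
       then [String.mk (PySem.Chars.strip (l.takeWhile pvIsDigitOrSep))] else [])
      ++ pvGoB (l.dropWhile pvIsDigitOrSep) := by
  cases l with
  | nil => simp [pvGoB]
  | cons c rest =>
      by_cases h : pvIsDigitOrSep c
      · rw [pvGoB]
        simp [h]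
      · simp [List.takeWhile_cons, List.dropWhile_cons, h]

lemma pvGoA_eq (l : List Char) (current : List Char) (hd : Bool) :
    pvGoA l [] current hd =
      (if !(current ++ l.takeWhile pvIsDigitOrSep).isEmpty
          && (hd || (l.takeWhile pvIsDigitOrSep).any PySem.Chars.isdigit)
       then [String.mk (PySem.Chars.strip (current ++ l.takeWhile pvIsDigitOrSep))] else [])
      ++ pvGoB (l.dropWhile pvIsDigitOrSep) := by
  induction l generalizing current hd with
  | nil => simp [pvGoA, pvGoB]
  | cons c rest ih =>
      by_cases h : pvIsDigitOrSep c
      · simp only [pvGoA, h, if_pos]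
        rw [ih]
        simp [List.takeWhile_cons, List.dropWhile_cons, h, Bool.or_assoc, List.append_assoc]
      · simp only [pvGoA, h, Bool.false_eq_true, if_neg, not_false_iff]
        rw [pvGoA_groups, ih]
        have hB : pvGoB (c :: rest) = pvGoB rest := by rw [pvGoB]; simp [h]
        rw [List.takeWhile_cons, List.dropWhile_cons]
        simp only [h, Bool.false_eq_true, if_neg, not_false_iff, ite_false]
        rw [hB, pvGoB_char rest]
        simp

-- ===== VERDICT (by name: the statement is the Claim_ definition above) =====
theorem extract_digit_groups_py_spec : Claim_equal_extract_digit_groups_py := by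
  intro text _
  unfold Spec_extract_digit_groups_py extract_digit_groups_py extract_digit_groups_py_alt
  rw [pvGoA_eq]
  rw [pvGoB_char text.toList]
  simp
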